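-- pv_equiv track=rewrite | github.com/siran/writing | .scripts/tools/era_factor_heuristic.py | slow_tau_up_to
-- ===== SOURCE A (Python) =====
-- from math import isqrt
--
-- def slow_power_cost(n: int) -> int:
--     best = n
--     max_b = n.bit_length() + 1
--     for power in range(2, max_b + 1):
--         lo = 2
--         hi = n
--         while lo <= hi:
--             mid = (lo + hi) // 2
--             value = mid**power
--             if value == n:
--                 best = min(best, max(mid, power))
--                 break
--             if value < n:
--                 lo = mid + 1
--             else:
--                 hi = mid - 1
--     return best
--
-- def slow_tau_up_to(limit: int) -> list[int]:
--     tau = [0] * (limit + 1)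
--     tau[1] = 1
--     for n in range(2, limit + 1):
--         best = slow_power_cost(n)
--         for a in range(2, isqrt(n) + 1):
--             if n % a != 0:
--                 continue
--             b = n // a
--             if gcd(a, b) != 1:
--                 continue
--             best = min(best, max(tau[a], tau[b]))
--         tau[n] = best
--     return tau
--
-- def gcd(a: int, b: int) -> int:
--     while b:
--         a, b = b, a % b
--     return a
-- ===== SOURCE B (Python) =====
-- from math import isqrt, gcd
--
-- def slow_tau_up_to(limit: int) -> list[int]:
--     tau = [0] * (limit + 1)
--     tau[1] = 1
--     for n in range(2, limit + 1):
--         best = n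
--         for a in range(2, isqrt(n) + 1):
--             # perfect-power candidate: is n a power of a?
--             v = a * a
--             p = 2
--             while v < n:
--                 v *= a
--                 p += 1
--             if v == n:
--                 best = min(best, max(a, p))
--             # coprime-split candidate
--             if n % a == 0:
--                 b = n // a
--                 if gcd(a, b) == 1:
--                     best = min(best, max(tau[a], tau[b]))
--         tau[n] = best
--     return tau
-- ===== Notes on version B (the rewrite author's own statement) =====
-- stated objective: faster
-- what changed: The per-n family of binary searches (one per candidate exponent up to bit_length) plus a separate divisor scan is replaced by a single fused scan over bases a in [2, isqrt(n)] that detects the perfect-power representation a^p = n by multiplying up and checks the coprime divisor split in the same pass.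
import Mathlib
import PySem

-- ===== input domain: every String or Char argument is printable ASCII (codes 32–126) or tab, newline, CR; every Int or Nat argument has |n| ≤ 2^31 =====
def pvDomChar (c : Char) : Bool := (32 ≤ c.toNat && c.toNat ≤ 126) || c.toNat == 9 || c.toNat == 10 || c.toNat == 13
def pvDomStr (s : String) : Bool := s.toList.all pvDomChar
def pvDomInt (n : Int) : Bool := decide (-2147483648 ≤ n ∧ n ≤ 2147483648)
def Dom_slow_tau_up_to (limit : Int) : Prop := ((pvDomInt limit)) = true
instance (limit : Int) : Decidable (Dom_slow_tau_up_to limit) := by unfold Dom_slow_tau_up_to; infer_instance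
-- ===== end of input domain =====

-- B replaces A's per-exponent binary searches + separate divisor scan by one fused base scan; equivalence proved on Pre_ (A raises IndexError on non-positive limit).

-- ===== PORT A =====

-- math.isqrt (exact for n ≥ 0, the only call sites here)
def pyIsqrt (n : Int) : Int := ((Nat.sqrt n.toNat : Nat) : Int)

-- A's helper gcd(a, b): while b: a, b = b, a % b  (fuel: |b| strictly decreases each step)
def pyGcdLoop (fuel : Nat) (a b : Int) : Int :=
  match fuel with
  | 0 => a
  | fuel + 1 => if b = 0 then a else pyGcdLoop fuel b (PySem.Int.mod a b)

def pyGcd (a b : Int) : Int := pyGcdLoop (b.natAbs + 1) a b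

-- A's 'while lo <= hi' binary search inside slow_power_cost, for one exponent `power`
-- (fuel: the interval [lo, hi] strictly shrinks each step, so (hi + 1 - lo).toNat suffices)
def powSearch (fuel : Nat) (n power lo hi best : Int) : Int :=
  match fuel with
  | 0 => best
  | fuel + 1 =>
    if lo ≤ hi then
      let mid := PySem.Int.floordiv (lo + hi) 2
      let value := mid ^ power.toNat   -- mid ** power; power ≥ 2 at every call
      if value = n then min best (max mid power)
      else if value < n then powSearch fuel n power (mid + 1) hi best
      else powSearch fuel n power lo (mid - 1) best
    else best

def slow_power_cost (n : Int) : Int :=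
  let max_b : Int := (PySem.Int.bitLength n : Int) + 1
  (PySem.List.pyRange 2 (max_b + 1) 1).foldl (fun best power => powSearch (n - 1).toNat n power 2 n best) n

def slow_tau_up_to (limit : Int) : List Int :=
  -- tau = [0]*(limit+1); tau[1] = 1 (IndexError on non-positive limit: excluded by Pre_)
  let tau := (List.replicate (limit + 1).toNat (0 : Int)).set 1 1
  (PySem.List.pyRange 2 (limit + 1) 1).foldl (fun tau n =>
    let best := slow_power_cost n
    let best := (PySem.List.pyRange 2 (pyIsqrt n + 1) 1).foldl (fun best a =>
      if PySem.Int.mod n a ≠ 0 then best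
      else
        let b := PySem.Int.floordiv n a
        if pyGcd a b ≠ 1 then best
        else min best (max (PySem.List.pyGetD tau a 0) (PySem.List.pyGetD tau b 0))) best
    PySem.List.pySetD tau n best) tau

-- ===== PORT B =====

-- B's 'while v < n: v *= a; p += 1' loop; fuel n.toNat suffices since v strictly grows (a ≥ 2 at call sites)
def probeLoop (a n : Int) (fuel : Nat) (v p : Int) : Int × Int :=
  match fuel with
  | 0 => (v, p)
  | fuel + 1 => if v < n then probeLoop a n fuel (v * a) (p + 1) else (v, p)

def slow_tau_up_to_alt (limit : Int) : List Int :=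
  let tau := (List.replicate (limit + 1).toNat (0 : Int)).set 1 1
  (PySem.List.pyRange 2 (limit + 1) 1).foldl (fun tau n =>
    let best := (PySem.List.pyRange 2 (pyIsqrt n + 1) 1).foldl (fun best a =>
      let vp := probeLoop a n n.toNat (a * a) 2
      let best := if vp.1 = n then min best (max a vp.2) else best
      if PySem.Int.mod n a = 0 then
        let b := PySem.Int.floordiv n a
        if (Int.gcd a b : Int) = 1 then
          min best (max (PySem.List.pyGetD tau a 0) (PySem.List.pyGetD tau b 0))
        else best
      else best) n
    PySem.List.pySetD tau n best) tau

-- ===== PRECONDITION & SPEC =====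
-- A (and B) raise IndexError on 'tau[1] = 1' on every non-positive limit; exactly those inputs are excluded.
def Pre_slow_tau_up_to (limit : Int) : Prop := 1 ≤ limit
instance (limit : Int) : Decidable (Pre_slow_tau_up_to limit) := by unfold Pre_slow_tau_up_to; infer_instance
def pvWitness_slow_tau_up_to : Int := 12

def Spec_slow_tau_up_to (limit : Int) (out : List Int) : Prop := out = slow_tau_up_to_alt limit
instance (limit : Int) (out : List Int) : Decidable (Spec_slow_tau_up_to limit out) := by unfold Spec_slow_tau_up_to; infer_instance

-- ===== CLAIM (what is proved, stated in full; the proofs are below) =====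
def Claim_equal_slow_tau_up_to : Prop := ∀ (limit : Int), Dom_slow_tau_up_to limit → Pre_slow_tau_up_to limit → Spec_slow_tau_up_to limit (slow_tau_up_to limit)

-- ===== LEMMAS AND PROOFS =====

-- ---- proof-side candidate generators ----

-- the root A's binary search finds, if any (same fuel discipline as powSearch)
def searchRoot (fuel : Nat) (n power lo hi : Int) : Option Int :=
  match fuel with
  | 0 => none
  | fuel + 1 =>
    if lo ≤ hi then
      let mid := PySem.Int.floordiv (lo + hi) 2
      let value := mid ^ power.toNat
      if value = n then some mid
      else if value < n then searchRoot fuel n power (mid + 1) hi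
      else searchRoot fuel n power lo (mid - 1)
    else none

def gPowA (n p : Int) : Option Int := (searchRoot (n - 1).toNat n p 2 n).map (fun r => max r p)

def gDivA (tau : List Int) (n a : Int) : Option Int :=
  if PySem.Int.mod n a ≠ 0 then none
  else if pyGcd a (PySem.Int.floordiv n a) ≠ 1 then none
  else some (max (PySem.List.pyGetD tau a 0) (PySem.List.pyGetD tau (PySem.Int.floordiv n a) 0))

def gProbe (n a : Int) : Option Int :=
  if (probeLoop a n n.toNat (a * a) 2).1 = n then some (max a (probeLoop a n n.toNat (a * a) 2).2) else none

def gDivB (tau : List Int) (n a : Int) : Option Int :=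
  if PySem.Int.mod n a = 0 then
    if (Int.gcd a (PySem.Int.floordiv n a) : Int) = 1 then
      some (max (PySem.List.pyGetD tau a 0) (PySem.List.pyGetD tau (PySem.Int.floordiv n a) 0))
    else none
  else none

-- ---- generic min-fold machinery ----

theorem foldl_min_cands (cand : Int → List Int) (step : Int → Int → Int)
    (hstep : ∀ b x, step b x = (cand x).foldl min b) (l : List Int) (b : Int) :
    l.foldl step b = (l.flatMap cand).foldl min b := by
  induction l generalizing b with
  | nil => rfl
  | cons x t ih =>
    simp only [List.foldl_cons, List.flatMap_cons, List.foldl_append, hstep, ih]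

theorem foldl_min_congr_mem (b : Int) (L₁ L₂ : List Int) (h : ∀ x, x ∈ L₁ ↔ x ∈ L₂) :
    L₁.foldl min b = L₂.foldl min b := by
  have le₁ := PySem.List.foldl_min_le L₁ b
  have le₂ := PySem.List.foldl_min_le L₂ b
  have m₁ := PySem.List.foldl_min_mem L₁ b
  have m₂ := PySem.List.foldl_min_mem L₂ b
  apply le_antisymm
  · rcases m₂ with hm | hm
    · rw [hm]; exact le₁.1
    · exact le₁.2 _ ((h _).mpr hm)
  · rcases m₁ with hm | hm
    · rw [hm]; exact le₂.1
    · exact le₂.2 _ ((h _).mp hm)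

-- ---- A's binary search ----

theorem powSearch_eq_searchRoot (n p b : Int) :
    ∀ (fuel : Nat) (lo hi : Int),
    powSearch fuel n p lo hi b =
      match searchRoot fuel n p lo hi with
      | none => b
      | some r => min b (max r p) := by
  intro fuel
  induction fuel with
  | zero => intro lo hi; rfl
  | succ fuel ih =>
    intro lo hi
    simp only [powSearch, searchRoot]
    split_ifs with hle h1 h2
    · rfl
    · exact ih _ _
    · exact ih _ _
    · rfl

theorem searchRoot_some (n p : Int) :
    ∀ (fuel : Nat) (lo hi r : Int), searchRoot fuel n p lo hi = some r →
      lo ≤ r ∧ r ≤ hi ∧ r ^ p.toNat = n := by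
  intro fuel
  induction fuel with
  | zero => intro lo hi r h; exact absurd h (by simp [searchRoot])
  | succ fuel ih =>
    intro lo hi r h
    simp only [searchRoot] at h
    split_ifs at h with hle h1 h2
    · cases h
      have hb := PySem.Int.floordiv_two_mid_bounds hle
      exact ⟨hb.1, hb.2, h1⟩
    · have hb := PySem.Int.floordiv_two_mid_bounds hle
      have := ih _ _ _ h
      exact ⟨by omega, this.2.1, this.2.2⟩
    · have hb := PySem.Int.floordiv_two_mid_bounds hle
      have := ih _ _ _ h
      exact ⟨this.1, by omega, this.2.2⟩

theorem searchRoot_complete (n p : Int) (hp : 1 ≤ p.toNat) :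
    ∀ (fuel : Nat) (lo hi r : Int), (hi + 1 - lo).toNat ≤ fuel → 2 ≤ lo →
      lo ≤ r → r ≤ hi → r ^ p.toNat = n →
      searchRoot fuel n p lo hi = some r := by
  intro fuel
  induction fuel with
  | zero => intro lo hi r hf _ h1 h2 _; omega
  | succ fuel ih =>
    intro lo hi r hf hlo h1 h2 h3
    have hle : lo ≤ hi := by omega
    have hb := PySem.Int.floordiv_two_mid_bounds hle
    simp only [searchRoot]
    rw [if_pos hle]
    split_ifs with hv hlt
    · -- the found mid equals r: both ≥ 2 and p-th roots of n
      rcases lt_trichotomy (PySem.Int.floordiv (lo + hi) 2) r with hc | hc | hc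
      · exfalso
        have := pow_lt_pow_left₀ (n := p.toNat) hc (by omega : (0:Int) ≤ PySem.Int.floordiv (lo + hi) 2) (by omega)
        omega
      · rw [hc]
      · exfalso
        have := pow_lt_pow_left₀ (n := p.toNat) hc (by omega : (0:Int) ≤ r) (by omega)
        omega
    · -- mid ^ p < n = r ^ p forces mid < r
      have hmr : PySem.Int.floordiv (lo + hi) 2 < r := by
        by_contra hge
        have := pow_le_pow_left₀ (by omega : (0:Int) ≤ r)
          (by omega : r ≤ PySem.Int.floordiv (lo + hi) 2) p.toNat
        omega
      refine ih _ _ _ ?_ ?_ ?_ h2 h3 <;> omega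
    · -- n < mid ^ p forces r < mid
      have hmr : r < PySem.Int.floordiv (lo + hi) 2 := by
        by_contra hge
        have := pow_le_pow_left₀ (by omega : (0:Int) ≤ PySem.Int.floordiv (lo + hi) 2)
          (by omega : PySem.Int.floordiv (lo + hi) 2 ≤ r) p.toNat
        omega
      refine ih _ _ _ ?_ hlo h1 ?_ h3 <;> omega

-- ---- B's probe loop ----

theorem probeLoop_spec (a n : Int) (ha : 2 ≤ a) :
    ∀ (fuel pk : Nat), (n - a ^ pk).toNat ≤ fuel → 1 ≤ pk →
    ∃ qk : Nat, probeLoop a n fuel (a ^ pk) (pk : Int) = ((a ^ qk : Int), (qk : Int)) ∧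
      pk ≤ qk ∧ n ≤ a ^ qk ∧ ∀ j : Nat, pk ≤ j → j < qk → (a ^ j : Int) < n := by
  intro fuel
  induction fuel with
  | zero =>
    intro pk hf hpk
    exact ⟨pk, rfl, le_refl _, by omega, by omega⟩
  | succ fuel ih =>
    intro pk hf hpk
    simp only [probeLoop]
    split_ifs with hlt
    · have h1 : (1:Int) ≤ a ^ pk := one_le_pow₀ (by omega)
      have h3 : a ^ (pk + 1) = a ^ pk * a := pow_succ a pk
      have h2 : a ^ pk + 1 ≤ a ^ pk * a := by nlinarith
      obtain ⟨qk, heq, hq1, hq2, hq3⟩ := ih (pk + 1) (by omega) (by omega)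
      refine ⟨qk, ?_, by omega, hq2, ?_⟩
      · rw [← heq, h3]
        push_cast
        ring_nf
      · intro j hj1 hj2
        rcases Nat.eq_or_lt_of_le hj1 with hj | hj
        · subst hj; exact hlt
        · exact hq3 j hj hj2
    · exact ⟨pk, rfl, le_refl _, by omega, by omega⟩

-- gProbe hits exactly the perfect-power representations with base a
theorem gProbe_eq_some_iff (n a x : Int) (ha : 2 ≤ a) (hsq : a * a ≤ n) :
    gProbe n a = some x ↔ ∃ q : Int, 2 ≤ q ∧ a ^ q.toNat = n ∧ x = max a q := by
  have hcall : probeLoop a n n.toNat (a * a) 2 = probeLoop a n n.toNat (a ^ 2) ((2 : Nat) : Int) := by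
    norm_num [pow_two]
  have hsq' : (0:Int) ≤ a * a := by positivity
  obtain ⟨qk, heq, hq1, hq2, hq3⟩ :=
    probeLoop_spec a n ha n.toNat 2 (by rw [pow_two]; omega) (by omega)
  have hn4 : (4:Int) ≤ n := by nlinarith
  unfold gProbe
  rw [hcall, heq]
  constructor
  · intro h
    split_ifs at h with hroot
    · cases h
      refine ⟨(qk : Int), by exact_mod_cast hq1, ?_, rfl⟩
      rw [Int.toNat_natCast]
      exact hroot
  · rintro ⟨q, hq, hpow, hx⟩
    have hqn : (0:Int) ≤ q := by omega
    have hqeq : q.toNat = qk := by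
      rcases lt_trichotomy q.toNat qk with hc | hc | hc
      · have := hq3 q.toNat (by omega) hc
        omega
      · exact hc
      · exfalso
        have hle1 : a ^ (qk + 1) ≤ a ^ q.toNat := pow_le_pow_right₀ (by omega) (by omega)
        have h3 : a ^ (qk + 1) = a ^ qk * a := pow_succ a qk
        nlinarith
    simp only [hqeq] at hpow ⊢
    rw [if_pos hpow]
    have : q = ((qk : Int)) := by omega
    rw [hx, this]

-- ---- gcd ----

theorem pyGcdLoop_eq (fuel : Nat) :
    ∀ a b : Int, 0 ≤ a → 0 ≤ b → b.natAbs < fuel → pyGcdLoop fuel a b = (Int.gcd a b : Int) := by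
  induction fuel with
  | zero => intro a b _ _ h; omega
  | succ fuel ih =>
    intro a b ha hb hf
    simp only [pyGcdLoop]
    split_ifs with hz
    · subst hz
      rw [Int.gcd_zero_right, Int.natAbs_of_nonneg ha]
    · have hbpos : 0 < b := by omega
      rw [PySem.Int.mod_eq_emod_of_pos hbpos]
      have h1 : 0 ≤ a % b := Int.emod_nonneg a (by omega)
      have h2 : a % b < b := Int.emod_lt_of_pos a hbpos
      rw [ih b (a % b) hb h1 (by omega)]
      congr 1
      -- Int.gcd b (a % b) = Int.gcd a b
      unfold Int.gcd
      have hcast : ((a.natAbs % b.natAbs : Nat) : Int) = a % b := by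
        push_cast
        rw [abs_of_nonneg ha, abs_of_nonneg hb]
      have hmod : (a % b).natAbs = a.natAbs % b.natAbs := by omega
      rw [hmod, Nat.gcd_comm, ← Nat.gcd_rec]
      exact Nat.gcd_comm _ _

theorem pyGcd_eq_gcd (a b : Int) (ha : 0 ≤ a) (hb : 0 ≤ b) : pyGcd a b = (Int.gcd a b : Int) :=
  pyGcdLoop_eq (b.natAbs + 1) a b ha hb (by omega)

theorem gDivA_eq_gDivB (tau : List Int) (n a : Int) (hn : 2 ≤ n) (ha : 2 ≤ a) :
    gDivA tau n a = gDivB tau n a := by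
  have hbn : 0 ≤ PySem.Int.floordiv n a := by
    rw [PySem.Int.floordiv_eq_ediv_of_pos (by omega)]
    exact Int.ediv_nonneg (by omega) (by omega)
  have hg := pyGcd_eq_gcd a (PySem.Int.floordiv n a) (by omega) hbn
  unfold gDivA gDivB
  split_ifs with h1 h2 h3 h4 h5 <;> simp_all

-- ---- candidate-set equality for the power part ----

theorem le_isqrt_iff (m n : Int) (hm : 0 ≤ m) (hn : 0 ≤ n) :
    m ≤ pyIsqrt n ↔ m * m ≤ n := by
  unfold pyIsqrt
  have h := Nat.le_sqrt (m := m.toNat) (n := n.toNat)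
  have hc : ((m.toNat * m.toNat : Nat) : Int) = m * m := by
    push_cast [Int.toNat_of_nonneg hm]
    ring
  constructor
  · intro hle
    have : m.toNat ≤ Nat.sqrt n.toNat := by omega
    have := h.mp this
    omega
  · intro hle
    have : m.toNat * m.toNat ≤ n.toNat := by omega
    have := h.mpr this
    omega

theorem mem_powA_iff (n x : Int) (hn : 2 ≤ n) :
    (∃ p ∈ PySem.List.pyRange 2 ((PySem.Int.bitLength n : Int) + 1 + 1) 1, gPowA n p = some x) ↔
      ∃ m q : Int, 2 ≤ m ∧ 2 ≤ q ∧ m ^ q.toNat = n ∧ x = max m q := by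
  constructor
  · rintro ⟨p, hp, hg⟩
    rw [PySem.List.mem_pyRange_one] at hp
    unfold gPowA at hg
    rw [Option.map_eq_some_iff] at hg
    obtain ⟨r, hr, hx⟩ := hg
    have := searchRoot_some n p _ _ _ _ hr
    exact ⟨r, p, by omega, hp.1, this.2.2, hx.symm⟩
  · rintro ⟨m, q, hm, hq, hpow, hx⟩
    refine ⟨q, ?_, ?_⟩
    · rw [PySem.List.mem_pyRange_one]
      -- 2^q ≤ m^q = n < 2^(bitLength n) bounds q
      have h2 : (2:Int) ^ q.toNat ≤ m ^ q.toNat := pow_le_pow_left₀ (by omega) hm _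
      have h3 := PySem.Int.lt_two_pow_bitLength n
      have h4 : ((2 ^ q.toNat : Nat) : Int) = (2:Int) ^ q.toNat := by push_cast; rfl
      have h5 : (2:Nat) ^ q.toNat < 2 ^ PySem.Int.bitLength n := by omega
      have h6 : q.toNat < PySem.Int.bitLength n := by
        exact (Nat.pow_lt_pow_iff_right (by omega)).mp h5
      omega
    · unfold gPowA
      have hmn : m ≤ n := by
        calc m ≤ m ^ q.toNat := le_self_pow₀ (by omega) (by omega)
          _ = n := hpow
      rw [searchRoot_complete n q (by omega) _ 2 n m (by omega) (by omega) (by omega) hmn hpow]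
      rw [hx]
      rfl

theorem mem_powB_iff (n x : Int) (hn : 2 ≤ n) :
    (∃ a ∈ PySem.List.pyRange 2 (pyIsqrt n + 1) 1, gProbe n a = some x) ↔
      ∃ m q : Int, 2 ≤ m ∧ 2 ≤ q ∧ m ^ q.toNat = n ∧ x = max m q := by
  constructor
  · rintro ⟨a, ha, hg⟩
    rw [PySem.List.mem_pyRange_one] at ha
    have hsq : a * a ≤ n := by
      rw [← le_isqrt_iff a n (by omega) (by omega)]
      omega
    obtain ⟨q, hq, hpow, hx⟩ := (gProbe_eq_some_iff n a x ha.1 hsq).mp hg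
    exact ⟨a, q, ha.1, hq, hpow, hx⟩
  · rintro ⟨m, q, hm, hq, hpow, hx⟩
    have hsq : m * m ≤ n := by
      have : m ^ 2 ≤ m ^ q.toNat := pow_le_pow_right₀ (by omega) (by omega)
      nlinarith [this, hpow]
    refine ⟨m, ?_, (gProbe_eq_some_iff n m x hm hsq).mpr ⟨q, hq, hpow, hx⟩⟩
    rw [PySem.List.mem_pyRange_one]
    have := (le_isqrt_iff m n (by omega) (by omega)).mpr hsq
    omega

-- ---- per-n step equality ----

theorem best_eq (tau : List Int) (n : Int) (hn : 2 ≤ n) :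
    ((PySem.List.pyRange 2 (pyIsqrt n + 1) 1).foldl (fun best a =>
      if PySem.Int.mod n a ≠ 0 then best
      else
        let b := PySem.Int.floordiv n a
        if pyGcd a b ≠ 1 then best
        else min best (max (PySem.List.pyGetD tau a 0) (PySem.List.pyGetD tau b 0)))
      (slow_power_cost n)) =
    ((PySem.List.pyRange 2 (pyIsqrt n + 1) 1).foldl (fun best a =>
      let vp := probeLoop a n n.toNat (a * a) 2
      let best := if vp.1 = n then min best (max a vp.2) else best
      if PySem.Int.mod n a = 0 then
        let b := PySem.Int.floordiv n a
        if (Int.gcd a b : Int) = 1 then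
          min best (max (PySem.List.pyGetD tau a 0) (PySem.List.pyGetD tau b 0))
        else best
      else best) n) := by
  have hPow : ∀ (b p : Int), powSearch (n - 1).toNat n p 2 n b = ((gPowA n p).toList).foldl min b := by
    intro b p
    rw [powSearch_eq_searchRoot]
    unfold gPowA
    cases searchRoot (n - 1).toNat n p 2 n <;> simp
  have hDivStep : ∀ (b a : Int),
      (if PySem.Int.mod n a ≠ 0 then b
       else
         if pyGcd a (PySem.Int.floordiv n a) ≠ 1 then b
         else min b (max (PySem.List.pyGetD tau a 0) (PySem.List.pyGetD tau (PySem.Int.floordiv n a) 0))) =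
      ((gDivA tau n a).toList).foldl min b := by
    intro b a
    unfold gDivA
    split_ifs <;> simp
  have hBStep : ∀ (b a : Int),
      (let vp := probeLoop a n n.toNat (a * a) 2
       let best := if vp.1 = n then min b (max a vp.2) else b
       if PySem.Int.mod n a = 0 then
         let bb := PySem.Int.floordiv n a
         if (Int.gcd a bb : Int) = 1 then
           min best (max (PySem.List.pyGetD tau a 0) (PySem.List.pyGetD tau bb 0))
         else best
       else best) =
      ((gProbe n a).toList ++ (gDivB tau n a).toList).foldl min b := by
    intro b a
    unfold gProbe gDivB
    split_ifs <;> simp_all [Nat.cast_eq_one]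
  have e1 : slow_power_cost n =
      ((PySem.List.pyRange 2 ((PySem.Int.bitLength n : Int) + 1 + 1) 1).flatMap
        (fun p => (gPowA n p).toList)).foldl min n := by
    unfold slow_power_cost
    exact foldl_min_cands _ _ hPow _ _
  calc ((PySem.List.pyRange 2 (pyIsqrt n + 1) 1).foldl (fun best a =>
      if PySem.Int.mod n a ≠ 0 then best
      else
        let b := PySem.Int.floordiv n a
        if pyGcd a b ≠ 1 then best
        else min best (max (PySem.List.pyGetD tau a 0) (PySem.List.pyGetD tau b 0)))
      (slow_power_cost n))
      = ((PySem.List.pyRange 2 (pyIsqrt n + 1) 1).flatMap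
          (fun a => (gDivA tau n a).toList)).foldl min (slow_power_cost n) :=
        foldl_min_cands _ _ hDivStep _ _
    _ = (((PySem.List.pyRange 2 ((PySem.Int.bitLength n : Int) + 1 + 1) 1).flatMap
          (fun p => (gPowA n p).toList)) ++
         ((PySem.List.pyRange 2 (pyIsqrt n + 1) 1).flatMap
          (fun a => (gDivA tau n a).toList))).foldl min n := by
        rw [e1, List.foldl_append]
    _ = ((PySem.List.pyRange 2 (pyIsqrt n + 1) 1).flatMap
          (fun a => (gProbe n a).toList ++ (gDivB tau n a).toList)).foldl min n := by
        apply foldl_min_congr_mem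
        intro x
        simp only [List.mem_append, List.mem_flatMap, Option.mem_toList]
        have hpowiff := (mem_powA_iff n x hn).trans (mem_powB_iff n x hn).symm
        constructor
        · rintro (hp | ⟨a, haR, hg⟩)
          · obtain ⟨a, haR, hg⟩ := hpowiff.mp hp
            exact ⟨a, haR, Or.inl hg⟩
          · have ha2 : 2 ≤ a := (PySem.List.mem_pyRange_one.mp haR).1
            rw [gDivA_eq_gDivB tau n a hn ha2] at hg
            exact ⟨a, haR, Or.inr hg⟩
        · rintro ⟨a, haR, hg | hg⟩
          · exact Or.inl (hpowiff.mpr ⟨a, haR, hg⟩)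
          · have ha2 : 2 ≤ a := (PySem.List.mem_pyRange_one.mp haR).1
            rw [← gDivA_eq_gDivB tau n a hn ha2] at hg
            exact Or.inr ⟨a, haR, hg⟩
    _ = ((PySem.List.pyRange 2 (pyIsqrt n + 1) 1).foldl (fun best a =>
      let vp := probeLoop a n n.toNat (a * a) 2
      let best := if vp.1 = n then min best (max a vp.2) else best
      if PySem.Int.mod n a = 0 then
        let b := PySem.Int.floordiv n a
        if (Int.gcd a b : Int) = 1 then
          min best (max (PySem.List.pyGetD tau a 0) (PySem.List.pyGetD tau b 0))
        else best
      else best) n) := (foldl_min_cands _ _ hBStep _ _).symm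

-- ===== VERDICT (by name: the statement is the Claim_ definition above) =====
theorem slow_tau_up_to_spec : Claim_equal_slow_tau_up_to := by
  intro limit _ _
  unfold Spec_slow_tau_up_to slow_tau_up_to slow_tau_up_to_alt
  apply PySem.List.foldl_congr_mem
  intro tau n hn
  rw [PySem.List.mem_pyRange_one] at hn
  simp only
  rw [best_eq tau n hn.1]
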